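-- pv_equiv track=rewrite | github.com/dpalatynski/AdventOfCode | 2018/solutions/Day_02.py | day2_part1
-- ===== SOURCE A (Python) =====
-- def day2_part1(sample_input):
--     modified_input = sample_input.split('\n')
--     counter_2, counter_3 = 0, 0
--     for entry in modified_input:
--         all_letters = set(entry)
--         once_added_2, once_added_3 = False, False
--         for letter in all_letters:
--             counter = entry.count(letter)
--             if counter == 2 and not once_added_2:
--                 counter_2 += 1
--                 once_added_2 = True
--             elif counter == 3 and not once_added_3:
--                 counter_3 += 1
--                 once_added_3 = True
--
--     return counter_2 * counter_3
-- ===== SOURCE B (Python) =====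
-- def day2_part1(sample_input):
--     twos, threes = 0, 0
--     for entry in sample_input.split('\n'):
--         chars = sorted(entry)
--         has2, has3 = False, False
--         i, n = 0, len(chars)
--         while i < n:
--             j = i + 1
--             while j < n and chars[j] == chars[i]:
--                 j += 1
--             if j - i == 2:
--                 has2 = True
--             elif j - i == 3:
--                 has3 = True
--             i = j
--         twos += has2
--         threes += has3
--     return twos * threes
-- ===== Notes on version B (the rewrite author's own statement) =====
-- stated objective: alternative
-- what changed: B sorts each entry's characters and scans runs of equal adjacent characters with a two-pointer while loop, flagging a run of length exactly 2 or 3, instead of A's loop over distinct letters calling entry.count with once_added flags.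
import Mathlib
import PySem

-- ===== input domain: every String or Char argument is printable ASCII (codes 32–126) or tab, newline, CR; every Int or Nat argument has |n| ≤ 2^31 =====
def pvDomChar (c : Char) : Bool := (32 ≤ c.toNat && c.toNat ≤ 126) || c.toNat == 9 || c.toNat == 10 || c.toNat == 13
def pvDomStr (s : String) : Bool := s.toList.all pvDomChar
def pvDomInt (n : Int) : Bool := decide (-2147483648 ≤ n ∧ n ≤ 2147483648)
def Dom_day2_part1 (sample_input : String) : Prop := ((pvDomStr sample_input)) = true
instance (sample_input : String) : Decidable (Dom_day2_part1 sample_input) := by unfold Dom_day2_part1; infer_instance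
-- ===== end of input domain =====

-- B uses a different algorithm: instead of counting each distinct letter with entry.count
-- and flag booleans, it sorts each entry and scans runs of equal adjacent characters,
-- flagging a run of length exactly 2 or 3 (objective: alternative).

-- ===== PORT A =====
-- inner loop body of A: counter = entry.count(letter); the two flagged branches.
-- entry.count(letter) for a single character is exactly the character count, ported as List.count.
def dayAstep (cs : List Char) (s : Int × Int × Bool × Bool) (letter : Char) : Int × Int × Bool × Bool :=
  let counter := cs.count letter
  if counter == 2 && !s.2.2.1 then (s.1 + 1, s.2.1, true, s.2.2.2)
  else if counter == 3 && !s.2.2.2 then (s.1, s.2.1 + 1, s.2.2.1, true)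
  else s

def day2_part1 (sample_input : String) : Int :=
  let modified_input := (PySem.Str.split? sample_input "\n").getD []
  -- the Python iterates set(entry); the result does not depend on the iteration order
  let st := modified_input.foldl (fun (st : Int × Int) entry =>
      let all_letters : PySem.Set Char := PySem.Set.ofList entry.toList
      let r := all_letters.foldl (dayAstep entry.toList) (st.1, st.2, false, false)
      (r.1, r.2.1)) ((0 : Int), (0 : Int))
  st.1 * st.2

-- ===== PORT B =====
-- B's inner while-loop over the sorted character list: advance j past the characters
-- equal to chars[i] (= take/drop the equal prefix of the suffix), record whether the run
-- length j - i is exactly 2 / exactly 3, continue at position j.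
def runScan : List Char → Bool × Bool
  | [] => (false, false)
  | c :: rest =>
    let run := (rest.takeWhile (· == c)).length + 1
    let p := runScan (rest.dropWhile (· == c))
    if run == 2 then (true, p.2) else if run == 3 then (p.1, true) else p
termination_by l => l.length
decreasing_by
  have := List.length_dropWhile_le (· == c) rest
  simp only [List.length_cons]
  omega

def day2_part1_alt (sample_input : String) : Int :=
  let st := ((PySem.Str.split? sample_input "\n").getD []).foldl (fun (st : Int × Int) entry =>
      let p := runScan (PySem.List.sorted entry.toList (fun x => x) false)
      (st.1 + (if p.1 then 1 else 0), st.2 + (if p.2 then 1 else 0))) ((0 : Int), (0 : Int))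
  st.1 * st.2

-- ===== PRECONDITION & SPEC =====
def Spec_day2_part1 (sample_input : String) (out : Int) : Prop := out = day2_part1_alt sample_input
instance (sample_input : String) (out : Int) : Decidable (Spec_day2_part1 sample_input out) := by unfold Spec_day2_part1; infer_instance

-- ===== CLAIM (what is proved, stated in full; the proofs are below) =====
def Claim_equal_day2_part1 : Prop := ∀ (sample_input : String), Dom_day2_part1 sample_input → Spec_day2_part1 sample_input (day2_part1 sample_input)

-- ===== LEMMAS AND PROOFS =====

-- characterisation of A's inner flagged loop over the distinct letters
theorem dayAstep_foldl (cs : List Char) (L : List Char) : ∀ (c2 c3 : Int) (f2 f3 : Bool),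
    L.foldl (dayAstep cs) (c2, c3, f2, f3) =
      (c2 + (if !f2 && L.any (fun l => cs.count l == 2) then 1 else 0),
       c3 + (if !f3 && L.any (fun l => cs.count l == 3) then 1 else 0),
       f2 || L.any (fun l => cs.count l == 2),
       f3 || L.any (fun l => cs.count l == 3)) := by
  induction L with
  | nil => intro c2 c3 f2 f3; simp
  | cons l L ih =>
    intro c2 c3 f2 f3
    simp only [List.foldl_cons, List.any_cons]
    by_cases h2 : cs.count l = 2
    · have e2 : (cs.count l == 2) = true := by simp [h2]
      have e3 : (cs.count l == 3) = false := by simp [h2]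
      cases f2 <;> simp [dayAstep, e2, e3, ih]
    · have e2 : (cs.count l == 2) = false := by simp only [beq_eq_false_iff_ne, ne_eq]; omega
      by_cases h3 : cs.count l = 3
      · have e3 : (cs.count l == 3) = true := by simp [h3]
        cases f3 <;> simp [dayAstep, e2, e3, ih]
      · have e3 : (cs.count l == 3) = false := by simp only [beq_eq_false_iff_ne, ne_eq]; omega
        simp [dayAstep, e2, e3, ih]

-- in a sorted list whose elements are all ≥ c, nothing left after dropping the c-prefix equals c
theorem dropWhile_ne_of_sorted (c : Char) (rest : List Char)
    (hge : ∀ x ∈ rest, c ≤ x) (hp : rest.Pairwise (· ≤ ·)) :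
    ∀ x ∈ rest.dropWhile (· == c), x ≠ c := by
  induction rest with
  | nil => intro x hx; simp at hx
  | cons y ys ih =>
    by_cases hy : (y == c) = true
    · simp only [List.dropWhile_cons, hy, if_true]
      exact ih (fun x hx => hge x (List.mem_cons_of_mem y hx)) (List.pairwise_cons.mp hp).2
    · simp only [List.dropWhile_cons, hy]
      have hyne : y ≠ c := by simpa using hy
      have hylt : c < y := lt_of_le_of_ne (hge y List.mem_cons_self) (fun e => hyne e.symm)
      intro x hx
      rcases List.mem_cons.mp hx with rfl | hx'
      · exact hyne
      · have : y ≤ x := (List.pairwise_cons.mp hp).1 x hx'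
        exact fun e => absurd (e ▸ this) (not_le.mpr hylt)

-- on a sorted list, equal characters are adjacent, so the run scan detects exactly
-- the existence of a character with count 2 (resp. 3)
theorem runScan_sorted (n : Nat) : ∀ (l : List Char), l.length ≤ n → l.Pairwise (· ≤ ·) →
    runScan l = (l.any (fun x => l.count x == 2), l.any (fun x => l.count x == 3)) := by
  induction n with
  | zero =>
    intro l hl _
    have : l = [] := List.eq_nil_of_length_eq_zero (Nat.le_zero.mp hl)
    subst this
    rw [runScan]; simp
  | succ n ih =>
    intro l hl hp
    match l with
    | [] => rw [runScan]; simp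
    | c :: rest =>
      have hge : ∀ x ∈ rest, c ≤ x := (List.pairwise_cons.mp hp).1
      have hpr : rest.Pairwise (· ≤ ·) := (List.pairwise_cons.mp hp).2
      have hsplit : rest = rest.takeWhile (· == c) ++ rest.dropWhile (· == c) :=
        (List.takeWhile_append_dropWhile).symm
      have htc : ∀ x ∈ rest.takeWhile (· == c), x = c := fun x hx => by
        have := List.mem_takeWhile_imp hx; simpa using this
      have hdc : ∀ x ∈ rest.dropWhile (· == c), x ≠ c := dropWhile_ne_of_sorted c rest hge hpr
      -- count of c in the whole list is the run length
      have hcount_c : (c :: rest).count c = (rest.takeWhile (· == c)).length + 1 := by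
        have h1 : (rest.takeWhile (· == c)).count c = (rest.takeWhile (· == c)).length :=
          List.count_eq_length.mpr (fun x hx => by simpa using (htc x hx).symm)
        have h2 : (rest.dropWhile (· == c)).count c = 0 :=
          List.count_eq_zero.mpr (fun h => (hdc c h) rfl)
        have hr : List.count c rest = (rest.takeWhile (· == c)).length := by
          conv_lhs => rw [hsplit]
          rw [List.count_append, h1, h2]
          omega
        simp [hr]
      -- count of x ≠ c in the whole list equals its count after the run
      have hcount_ne : ∀ x, x ≠ c → (c :: rest).count x = (rest.dropWhile (· == c)).count x := by
        intro x hx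
        have h1 : (rest.takeWhile (· == c)).count x = 0 :=
          List.count_eq_zero.mpr (fun h => hx (htc x h))
        have hr : List.count x rest = List.count x (rest.dropWhile (· == c)) := by
          conv_lhs => rw [hsplit]
          rw [List.count_append, h1]
          omega
        have hx' : ¬ (c = x) := fun e => hx e.symm
        simp [hr, hx']
      -- existence over the whole list splits into c's count and existence after the run
      have hany : ∀ k : Nat,
          ((c :: rest).any (fun x => (c :: rest).count x == k))
            = (((c :: rest).count c == k)
                || (rest.dropWhile (· == c)).any
                    (fun x => (rest.dropWhile (· == c)).count x == k)) := by
        intro k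
        rw [Bool.eq_iff_iff]
        simp only [Bool.or_eq_true, List.any_eq_true, beq_iff_eq]
        constructor
        · rintro ⟨x, hx, hcx⟩
          by_cases hxc : x = c
          · exact Or.inl (hxc ▸ hcx)
          · refine Or.inr ⟨x, ?_, (hcount_ne x hxc) ▸ hcx⟩
            rcases List.mem_cons.mp hx with rfl | hx'
            · exact absurd rfl hxc
            · rcases List.mem_append.mp (hsplit ▸ hx') with h | h
              · exact absurd (htc x h) hxc
              · exact h
        · rintro (h | ⟨x, hx, hcx⟩)
          · exact ⟨c, List.mem_cons_self, h⟩
          · refine ⟨x, ?_, (hcount_ne x (hdc x hx)) ▸ hcx⟩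
            exact List.mem_cons.mpr (Or.inr (hsplit ▸ List.mem_append.mpr (Or.inr hx)))
      -- recursive call via the induction hypothesis
      have hdl : (rest.dropWhile (· == c)).length ≤ n := by
        have h1 := List.length_dropWhile_le (· == c) rest
        have h2 : rest.length + 1 ≤ n + 1 := by simpa using hl
        omega
      have hpd : (rest.dropWhile (· == c)).Pairwise (· ≤ ·) :=
        hpr.sublist (List.dropWhile_sublist _)
      have hrec := ih (rest.dropWhile (· == c)) hdl hpd
      rw [runScan]
      simp only [hrec]
      rw [hany 2, hany 3, hcount_c]
      by_cases h2 : (rest.takeWhile (· == c)).length + 1 = 2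
      · simp [h2]
      · by_cases h3 : (rest.takeWhile (· == c)).length + 1 = 3
        · simp [h3]
        · have e2 : ((rest.takeWhile (· == c)).length + 1 == 2) = false := by simp only [beq_eq_false_iff_ne, ne_eq]; omega
          have e3 : ((rest.takeWhile (· == c)).length + 1 == 3) = false := by simp only [beq_eq_false_iff_ne, ne_eq]; omega
          simp [e2, e3]

-- bridge: "some character of sorted(entry) has count k there" is A's
-- "some distinct letter of entry has count k in entry" (sorting permutes)
theorem sorted_any_eq_set_any (cs : List Char) (k : Nat) :
    ((PySem.List.sorted cs (fun x => x) false).any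
        (fun x => (PySem.List.sorted cs (fun x => x) false).count x == k))
      = ((PySem.Set.ofList cs).any (fun x => cs.count x == k)) := by
  have hperm : (PySem.List.sorted cs (fun x => x) false).Perm cs := PySem.List.sorted_perm cs _ _
  rw [Bool.eq_iff_iff]
  simp only [List.any_eq_true, PySem.Set.mem_ofList, beq_iff_eq]
  constructor
  · rintro ⟨x, hx, h⟩; exact ⟨x, hperm.mem_iff.mp hx, (hperm.count_eq x) ▸ h⟩
  · rintro ⟨x, hx, h⟩; exact ⟨x, hperm.mem_iff.mpr hx, (hperm.count_eq x).symm ▸ h⟩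

-- ===== VERDICT (by name: the statement is the Claim_ definition above) =====
theorem day2_part1_spec : Claim_equal_day2_part1 := by
  intro s _
  show day2_part1 s = day2_part1_alt s
  simp only [day2_part1, day2_part1_alt]
  refine congrArg (fun p : Int × Int => p.1 * p.2) ?_
  congr 1
  funext st entry
  have hs := runScan_sorted (PySem.List.sorted entry.toList (fun x => x) false).length
    (PySem.List.sorted entry.toList (fun x => x) false) le_rfl
    (by simpa using PySem.List.sorted_pairwise entry.toList (fun x => x))
  simp only [dayAstep_foldl, hs, sorted_any_eq_set_any]
  cases hb2 : ((PySem.Set.ofList entry.toList).any fun l => entry.toList.count l == 2) <;>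
  cases hb3 : ((PySem.Set.ofList entry.toList).any fun l => entry.toList.count l == 3) <;>
    simp
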